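-- pv_equiv track=rewrite | github.com/preetambaheti/PhishGuard--Phishing-URL-Detection-System | daa.py | normalize_visually
-- ===== SOURCE A (Python) =====
-- def normalize_visually(domain):
--     replacements = {
--         '0': 'o',
--         '1': 'i',
--         '3': 'e',
--         '5': 's',
--         '@': 'a',
--         '7': 't',
--         '$': 's'
--     }
--     for fake_char, real_char in replacements.items():
--         domain = domain.replace(fake_char, real_char)
--     return domain
-- ===== SOURCE B (Python) =====
-- def normalize_visually(domain):
--     def fix(c):
--         if c == '0':
--             return 'o'
--         if c == '1':
--             return 'i'
--         if c == '3':
--             return 'e'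
--         if c == '5':
--             return 's'
--         if c == '@':
--             return 'a'
--         if c == '7':
--             return 't'
--         if c == '$':
--             return 's'
--         return c
--     out = []
--     for c in domain:
--         out.append(fix(c))
--     return ''.join(out)
-- ===== Notes on version B (the rewrite author's own statement) =====
-- stated objective: alternative
-- what changed: B drops the dict entirely and builds the result in one accumulator pass over the characters, mapping each through an explicit if-chain, instead of A's seven full-string replace passes driven by a dict; equivalent because no replacement output is itself a replacement key.
import Mathlib
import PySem

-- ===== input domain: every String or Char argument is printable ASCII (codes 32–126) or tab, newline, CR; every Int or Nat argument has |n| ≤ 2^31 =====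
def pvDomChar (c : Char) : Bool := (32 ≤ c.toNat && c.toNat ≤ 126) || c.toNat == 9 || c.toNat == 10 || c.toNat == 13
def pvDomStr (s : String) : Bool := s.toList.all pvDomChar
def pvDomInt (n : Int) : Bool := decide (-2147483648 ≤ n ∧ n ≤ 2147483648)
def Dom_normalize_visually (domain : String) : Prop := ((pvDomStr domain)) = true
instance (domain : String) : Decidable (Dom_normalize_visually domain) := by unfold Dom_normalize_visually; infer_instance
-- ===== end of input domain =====

-- B drops the dict and the seven replace passes: one accumulator pass over the characters,
-- each mapped by an explicit if-chain (equivalent: no replacement output is itself a key).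

-- ===== PORT A =====
def normalize_visually (domain : String) : String :=
  let replacements : PySem.Dict String String :=
    PySem.Dict.ofList [("0","o"),("1","i"),("3","e"),("5","s"),("@","a"),("7","t"),("$","s")]
  replacements.items.foldl (fun d p => PySem.Str.replace d p.1 p.2) domain

-- ===== PORT B =====
-- B's inner `fix`: the if-chain, returning a Char (Python's 1-char strings)
def nvFix (c : Char) : Char :=
  if c = '0' then 'o' else
  if c = '1' then 'i' else
  if c = '3' then 'e' else
  if c = '5' then 's' else
  if c = '@' then 'a' else
  if c = '7' then 't' else
  if c = '$' then 's' else c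

def normalize_visually_alt (domain : String) : String :=
  let out := domain.toList.foldl (fun out c => out ++ [nvFix c]) []
  String.ofList out

-- ===== PRECONDITION & SPEC =====
def Spec_normalize_visually (domain : String) (out : String) : Prop := out = normalize_visually_alt domain
instance (domain : String) (out : String) : Decidable (Spec_normalize_visually domain out) := by unfold Spec_normalize_visually; infer_instance

-- ===== CLAIM (what is proved, stated in full; the proofs are below) =====
def Claim_equal_normalize_visually : Prop := ∀ (domain : String), Dom_normalize_visually domain → Spec_normalize_visually domain (normalize_visually domain)

-- ===== LEMMAS AND PROOFS =====

lemma go_single (f r : Char) : ∀ (fuel : Nat) (cs acc : List Char), cs.length ≤ fuel →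
    PySem.Chars.replace.go [f] [r] fuel cs acc
      = acc.reverse ++ cs.map (fun c => if c = f then r else c) := by
  intro fuel
  induction fuel with
  | zero => intro cs acc h; cases cs with
    | nil => simp [PySem.Chars.replace.go]
    | cons c t => simp at h
  | succ n ih =>
    intro cs acc h
    cases cs with
    | nil => simp [PySem.Chars.replace.go]
    | cons c t =>
      simp only [PySem.Chars.replace.go]
      by_cases hc : c = f
      · subst hc
        simp [List.isPrefixOf, ih t (r :: acc) (by simpa using Nat.le_of_succ_le_succ h)]
      · simp [List.isPrefixOf, beq_iff_eq, hc, Ne.symm hc,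
          ih t (c :: acc) (by simpa using Nat.le_of_succ_le_succ h)]

lemma replace_single (cs : List Char) (f r : Char) :
    PySem.Chars.replace cs [f] [r] = cs.map (fun c => if c = f then r else c) := by
  unfold PySem.Chars.replace
  simpa using go_single f r cs.length cs [] le_rfl

set_option maxHeartbeats 1000000 in
lemma nvA_eq (domain : String) :
    normalize_visually domain = String.ofList (domain.toList.map nvFix) := by
  show List.foldl (fun d p => PySem.Str.replace d p.1 p.2) domain
      (PySem.Dict.ofList [("0","o"),("1","i"),("3","e"),("5","s"),("@","a"),("7","t"),("$","s")]).items
    = String.ofList (domain.toList.map nvFix)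
  have hitems : (PySem.Dict.ofList [("0","o"),("1","i"),("3","e"),("5","s"),("@","a"),("7","t"),("$","s")] : PySem.Dict String String).items
      = [("0","o"),("1","i"),("3","e"),("5","s"),("@","a"),("7","t"),("$","s")] := by decide
  rw [hitems]
  simp only [List.foldl, PySem.Str.replace, String.toList_ofList]
  rw [show ("0":String).toList = ['0'] from by decide, show ("o":String).toList = ['o'] from by decide,
     show ("1":String).toList = ['1'] from by decide, show ("i":String).toList = ['i'] from by decide,
     show ("3":String).toList = ['3'] from by decide, show ("e":String).toList = ['e'] from by decide,
     show ("5":String).toList = ['5'] from by decide, show ("s":String).toList = ['s'] from by decide,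
     show ("@":String).toList = ['@'] from by decide, show ("a":String).toList = ['a'] from by decide,
     show ("7":String).toList = ['7'] from by decide, show ("t":String).toList = ['t'] from by decide,
     show ("$":String).toList = ['$'] from by decide]
  simp only [replace_single, List.map_map]
  refine congrArg String.ofList (List.map_congr_left ?_)
  intro c _
  simp only [Function.comp_apply]
  by_cases e0 : c = '0'
  · subst e0; decide
  by_cases e1 : c = '1'
  · subst e1; decide
  by_cases e3 : c = '3'
  · subst e3; decide
  by_cases e5 : c = '5'
  · subst e5; decide
  by_cases ea : c = '@'
  · subst ea; decide
  by_cases e7 : c = '7'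
  · subst e7; decide
  by_cases ed : c = '$'
  · subst ed; decide
  simp [nvFix, e0, e1, e3, e5, ea, e7, ed]

lemma foldl_append_map (cs : List Char) : ∀ (acc : List Char),
    cs.foldl (fun out c => out ++ [nvFix c]) acc = acc ++ cs.map nvFix := by
  induction cs with
  | nil => intro acc; simp
  | cons c t ih => intro acc; simp [List.foldl, ih]

lemma nvB_eq (domain : String) :
    normalize_visually_alt domain = String.ofList (domain.toList.map nvFix) := by
  show String.ofList (domain.toList.foldl (fun out c => out ++ [nvFix c]) [])
      = String.ofList (domain.toList.map nvFix)
  rw [foldl_append_map]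
  simp

-- ===== VERDICT (by name: the statement is the Claim_ definition above) =====
theorem normalize_visually_spec : Claim_equal_normalize_visually := by
  intro domain _
  unfold Spec_normalize_visually
  rw [nvA_eq, nvB_eq]
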